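-- pv_equiv track=rewrite | github.com/JohanHansen-Hub/PythonProjects | Arkiv/all_sets_of_non-negative.py | findNoNNegative
-- ===== SOURCE A (Python) =====
-- def findNoNNegative(n):
--     integers = [i for i in range(0, n + 1)]
--     antall_sett = 0
--     for i in integers:
--         for j in integers:
--             for k in integers:
--                 if i + j + k == n:
--                     antall_sett += 1
--     return antall_sett
-- ===== SOURCE B (Python) =====
-- def findNoNNegative(n):
--     # Closed form: number of (i, j, k) >= 0 with i + j + k == n is C(n+2, 2).
--     if n < 0:
--         return 0
--     return (n + 1) * (n + 2) // 2
-- ===== Notes on version B (the rewrite author's own statement) =====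
-- stated objective: faster
-- what changed: Replaces the triple nested loop counting all (i,j,k) triples with the closed-form stars-and-bars formula (n+1)(n+2)//2 (0 for negative n).
import Mathlib
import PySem

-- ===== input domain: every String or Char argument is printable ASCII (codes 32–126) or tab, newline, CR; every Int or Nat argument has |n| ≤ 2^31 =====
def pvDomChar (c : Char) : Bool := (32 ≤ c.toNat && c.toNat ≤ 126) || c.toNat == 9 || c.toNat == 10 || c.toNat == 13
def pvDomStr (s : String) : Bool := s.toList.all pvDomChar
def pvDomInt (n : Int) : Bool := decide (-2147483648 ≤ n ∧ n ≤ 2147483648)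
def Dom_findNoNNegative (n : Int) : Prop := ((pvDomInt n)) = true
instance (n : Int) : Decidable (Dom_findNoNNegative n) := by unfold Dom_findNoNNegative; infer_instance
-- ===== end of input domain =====

-- B replaces A's O(n^3) triple loop by the closed-form count (n+1)(n+2)//2 (0 for n < 0).

-- ===== PORT A =====
def findNoNNegative (n : Int) : Int :=
  let integers : List Int := PySem.List.pyRange 0 (n + 1)
  integers.foldl (fun acc i =>
    integers.foldl (fun acc j =>
      integers.foldl (fun acc k =>
        if i + j + k = n then acc + 1 else acc) acc) acc) 0

-- ===== PORT B =====
def findNoNNegative_alt (n : Int) : Int :=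
  if n < 0 then 0 else PySem.Int.floordiv ((n + 1) * (n + 2)) 2

-- ===== PRECONDITION & SPEC =====
def Spec_findNoNNegative (n : Int) (out : Int) : Prop := out = findNoNNegative_alt n
instance (n : Int) (out : Int) : Decidable (Spec_findNoNNegative n out) := by unfold Spec_findNoNNegative; infer_instance

-- ===== CLAIM (what is proved, stated in full; the proofs are below) =====
def Claim_equal_findNoNNegative : Prop := ∀ (n : Int), Dom_findNoNNegative n → Spec_findNoNNegative n (findNoNNegative n)

-- ===== LEMMAS AND PROOFS =====

-- innermost loop: scanning k over range m adds 1 exactly when k = n - i - j lies in [0, m)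
theorem pv_inner (n i j a : Int) (m : Nat) :
    (List.range m).foldl (fun (acc : Int) (k : Nat) => if i + j + (0 + (k : Int)) = n then acc + 1 else acc) a
      = a + (if 0 ≤ n - i - j ∧ n - i - j < (m : Int) then 1 else 0) := by
  induction m generalizing a with
  | zero => simp
  | succ m ih =>
    rw [List.range_succ, List.foldl_append, ih]
    simp only [List.foldl_cons, List.foldl_nil]
    split_ifs <;> omega

-- middle loop: scanning j over range mj adds min(mj, n - i + 1) when the inner bound is n + 1
theorem pv_middle (n i a : Int) (hi : 0 ≤ i) (hin : i ≤ n) (m : Nat) (hm : (m : Int) = n + 1) (mj : Nat) :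
    (List.range mj).foldl (fun (acc : Int) (j : Nat) =>
        (List.range m).foldl (fun (acc : Int) (k : Nat) => if i + (0 + (j : Int)) + (0 + (k : Int)) = n then acc + 1 else acc) acc) a
      = a + min (mj : Int) (n - i + 1) := by
  induction mj generalizing a with
  | zero => simp only [List.range_zero, List.foldl_nil]; omega
  | succ mj ih =>
    rw [List.range_succ, List.foldl_append, ih]
    simp only [List.foldl_cons, List.foldl_nil, pv_inner]
    split_ifs <;> omega

-- outer loop, doubled to avoid division: 2 · (fold) = 2a + mi·(2n + 3 − mi)
theorem pv_outer (n a : Int) (m : Nat) (hm : (m : Int) = n + 1) (mi : Nat) (hmi : (mi : Int) ≤ n + 1) :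
    2 * (List.range mi).foldl (fun (acc : Int) (i : Nat) =>
        (List.range m).foldl (fun (acc : Int) (j : Nat) =>
          (List.range m).foldl (fun (acc : Int) (k : Nat) =>
            if (0 + (i : Int)) + (0 + (j : Int)) + (0 + (k : Int)) = n then acc + 1 else acc) acc) acc) a
      = 2 * a + (mi : Int) * (2 * n + 3 - (mi : Int)) := by
  induction mi generalizing a with
  | zero => simp
  | succ mi ih =>
    have hmi' : (mi : Int) ≤ n + 1 := by push_cast at hmi ⊢; omega
    rw [List.range_succ, List.foldl_append]
    simp only [List.foldl_cons, List.foldl_nil]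
    rw [pv_middle n (0 + (mi : Int)) _ (by omega) (by push_cast at hmi; omega) m hm m]
    have hmin : min (m : Int) (n - (0 + (mi : Int)) + 1) = n - (mi : Int) + 1 := by
      push_cast at hmi; omega
    rw [hmin]
    have h := ih a hmi'
    push_cast at h ⊢
    linear_combination h

-- ===== VERDICT (by name: the statement is the Claim_ definition above) =====
theorem findNoNNegative_spec : Claim_equal_findNoNNegative := by
  intro n _
  unfold Spec_findNoNNegative findNoNNegative findNoNNegative_alt
  rw [PySem.List.pyRange_one]
  simp only [List.foldl_map]
  by_cases hneg : n < 0
  · have : (n + 1 - 0).toNat = 0 := by omega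
    rw [this]
    simp [hneg]
  · have hm : ((n + 1 - 0).toNat : Int) = n + 1 := by omega
    have h2 := pv_outer n 0 (n + 1 - 0).toNat hm (n + 1 - 0).toNat (by omega)
    rw [PySem.Int.floordiv_eq_ediv_of_pos (by norm_num)]
    simp only [hneg, if_false]
    have hx : ((n + 1 - 0).toNat : Int) * (2 * n + 3 - ((n + 1 - 0).toNat : Int))
        = (n + 1) * (n + 2) := by rw [hm]; ring
    rw [hx] at h2
    omega
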